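-- pv_equiv track=rewrite | github.com/hosnemobarok/Problem-Solving | Codding Interview/4--String/8_Extract Maximum.py | extractMaximum
-- ===== SOURCE A (Python) =====
-- def extractMaximum(S):
--     # code here
--     if S.isalpha():
--         return -1
--
--     else:
--         res = ""
--         for i in range(len(S)):
--             if S[i].isdigit():
--                 res += S[i]
--             else:
--                 res += " "
--
--         return max([int(x) for x in res.split()])
-- ===== SOURCE B (Python) =====
-- def extractMaximum(S):
--     # single left-to-right scan collecting each maximal digit run as a number
--     if S.isalpha():
--         return -1
--     nums = []
--     cur = ""
--     for ch in S:
--         if ch.isdigit():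
--             cur += ch
--         elif cur:
--             nums.append(int(cur))
--             cur = ""
--     if cur:
--         nums.append(int(cur))
--     return max(nums)
-- ===== Notes on version B (the rewrite author's own statement) =====
-- stated objective: alternative
-- what changed: Replaces A's pipeline (build a space-masked copy of S, split it into tokens, max over a comprehension) with a single left-to-right scan that collects each maximal digit run directly into a number list and takes its max; Pre_ excludes strings that are neither all-alphabetic nor contain a digit, where both programs raise ValueError (max of an empty sequence).
import Mathlib
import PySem

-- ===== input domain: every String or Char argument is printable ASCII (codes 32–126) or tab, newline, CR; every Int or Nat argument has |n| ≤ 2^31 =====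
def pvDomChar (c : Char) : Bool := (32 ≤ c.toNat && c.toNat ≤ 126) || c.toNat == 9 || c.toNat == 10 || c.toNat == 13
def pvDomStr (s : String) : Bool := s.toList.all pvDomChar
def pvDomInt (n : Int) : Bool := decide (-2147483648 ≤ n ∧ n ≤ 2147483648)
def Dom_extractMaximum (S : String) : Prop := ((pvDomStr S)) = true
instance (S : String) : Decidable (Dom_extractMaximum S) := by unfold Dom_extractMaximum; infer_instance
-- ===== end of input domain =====

-- B replaces A's mask-build-then-split pipeline by a single scan collecting the numbers; return-value equivalence only.

-- ===== PORT A =====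
-- mask-and-split: for i in range(len(S)): res += S[i] if digit else " "; then max([int(x) for x in res.split()])
def extractMaximum (S : String) : Int :=
  let cs := S.toList
  if PySem.Chars.strIsalpha cs then -1
  else
    let res : List Char :=
      (PySem.List.pyRange 0 (PySem.Chars.len cs) 1).foldl
        (fun res i =>
          if PySem.Chars.isdigit (PySem.List.pyGetD cs i ' ') then res ++ [PySem.List.pyGetD cs i ' ']
          else res ++ [' ']) []
    let nums : List Int := (PySem.Chars.split₀ res).map (fun x => (PySem.Int.ofChars? x).getD 0)
    (PySem.List.max? nums (fun y => y)).getD 0   -- max([]) raises ValueError: excluded by Pre_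

-- ===== PORT B =====
-- loop body: extend the current digit run, or flush it as a number into nums
def pvStep (st : List Char × List Int) (c : Char) : List Char × List Int :=
  if PySem.Chars.isdigit c then (st.1 ++ [c], st.2)
  else if st.1 ≠ [] then ([], st.2 ++ [(PySem.Int.ofChars? st.1).getD 0])
  else ([], st.2)

def extractMaximum_alt (S : String) : Int :=
  if PySem.Chars.strIsalpha S.toList then -1
  else
    let st := S.toList.foldl pvStep ([], [])
    let nums := if st.1 ≠ [] then st.2 ++ [(PySem.Int.ofChars? st.1).getD 0] else st.2
    (PySem.List.max? nums (fun y => y)).getD 0   -- max([]) raises ValueError: excluded by Pre_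

-- ===== PRECONDITION & SPEC =====
-- Pre_ excludes exactly the inputs where Python A raises ValueError (max of an empty
-- sequence): S neither all-alphabetic nor containing a digit (B raises there too).
def Pre_extractMaximum (S : String) : Prop :=
  (PySem.Chars.strIsalpha S.toList || S.toList.any PySem.Chars.isdigit) = true
instance (S : String) : Decidable (Pre_extractMaximum S) := by unfold Pre_extractMaximum; infer_instance
def pvWitness_extractMaximum : String := "ab 007 x19"

def Spec_extractMaximum (S : String) (out : Int) : Prop := out = extractMaximum_alt S
instance (S : String) (out : Int) : Decidable (Spec_extractMaximum S out) := by unfold Spec_extractMaximum; infer_instance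

-- ===== CLAIM (what is proved, stated in full; the proofs are below) =====
def Claim_equal_extractMaximum : Prop := ∀ (S : String), Dom_extractMaximum S → Pre_extractMaximum S → Spec_extractMaximum S (extractMaximum S)

-- ===== LEMMAS AND PROOFS =====

-- the digit-or-space mask A builds
def pvMask (cs : List Char) : List Char := cs.map (fun c => if PySem.Chars.isdigit c then c else ' ')

-- the maximal digit runs of cs, continuing a pending run `cur`
def pvRunsFrom (cur : List Char) : List Char → List (List Char)
  | [] => if cur = [] then [] else [cur]
  | c :: rest =>
    if PySem.Chars.isdigit c then pvRunsFrom (cur ++ [c]) rest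
    else (if cur = [] then [] else [cur]) ++ pvRunsFrom [] rest

theorem pv_isspace_of_isdigit (c : Char) (h : PySem.Chars.isdigit c = true) :
    PySem.Chars.isspace c = false := by
  have hn : 48 ≤ c.toNat ∧ c.toNat ≤ 57 := by
    simp only [PySem.Chars.isdigit, Bool.and_eq_true, decide_eq_true_eq, Char.le_def,
      UInt32.le_iff_toNat_le] at h
    exact ⟨h.1, h.2⟩
  simp only [PySem.Chars.isspace]
  simp only [Bool.or_eq_false_iff, Bool.and_eq_false_iff, decide_eq_false_iff_not]
  omega

theorem pv_mask_foldl (cs : List Char) (init : List Char) :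
    cs.foldl (fun res c => if PySem.Chars.isdigit c then res ++ [c] else res ++ [' ']) init
      = init ++ pvMask cs := by
  induction cs generalizing init with
  | nil => simp [pvMask]
  | cons c rest ih =>
    by_cases h : PySem.Chars.isdigit c = true
    · rw [List.foldl_cons, if_pos h, ih (init ++ [c])]
      simp [pvMask, h]
    · rw [List.foldl_cons, if_neg h, ih (init ++ [' '])]
      simp [pvMask, h]

theorem pv_go_eq (cs : List Char) : ∀ (curR : List Char) (acc : List (List Char)),
    PySem.Chars.split₀.go (pvMask cs) curR acc = acc.reverse ++ pvRunsFrom curR.reverse cs := by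
  induction cs with
  | nil =>
    intro curR acc
    by_cases h : curR = []
    · simp [pvMask, PySem.Chars.split₀.go, pvRunsFrom, h]
    · simp [pvMask, PySem.Chars.split₀.go, pvRunsFrom, h, List.isEmpty_iff]
  | cons c rest ih =>
    intro curR acc
    by_cases h : PySem.Chars.isdigit c = true
    · have hs := pv_isspace_of_isdigit c h
      simp only [pvMask, List.map_cons, if_pos h]
      rw [show (c :: (rest.map fun c => if PySem.Chars.isdigit c then c else ' ')) = c :: pvMask rest from rfl]
      simp only [PySem.Chars.split₀.go, hs]
      rw [ih (c :: curR) acc]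
      simp [pvRunsFrom, h]
    · have hs : PySem.Chars.isspace ' ' = true := by decide
      simp only [pvMask, List.map_cons, if_neg h]
      rw [show ((rest.map fun c => if PySem.Chars.isdigit c then c else ' ')) = pvMask rest from rfl]
      by_cases hc : curR = []
      · subst hc
        simp only [PySem.Chars.split₀.go, hs, List.isEmpty_nil, if_true]
        rw [ih [] acc]
        simp [pvRunsFrom, h]
      · simp only [PySem.Chars.split₀.go, hs, List.isEmpty_iff, if_neg hc]
        rw [ih [] (curR.reverse :: acc)]
        simp [pvRunsFrom, h, List.reverse_eq_nil_iff, hc]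

theorem pv_split_mask (cs : List Char) :
    PySem.Chars.split₀ (pvMask cs) = pvRunsFrom [] cs := by
  show PySem.Chars.split₀.go (pvMask cs) [] [] = _
  rw [pv_go_eq cs [] []]; rfl

-- B's scan produces exactly the numbers of the maximal digit runs, in order
theorem pv_scan_eq (cs : List Char) : ∀ (cur : List Char) (nums : List Int),
    (if (cs.foldl pvStep (cur, nums)).1 ≠ [] then
        (cs.foldl pvStep (cur, nums)).2 ++ [(PySem.Int.ofChars? (cs.foldl pvStep (cur, nums)).1).getD 0]
      else (cs.foldl pvStep (cur, nums)).2)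
      = nums ++ (pvRunsFrom cur cs).map (fun x => (PySem.Int.ofChars? x).getD 0) := by
  induction cs with
  | nil =>
    intro cur nums
    by_cases h : cur = []
    · simp [h, pvRunsFrom]
    · simp [h, pvRunsFrom]
  | cons c rest ih =>
    intro cur nums
    by_cases h : PySem.Chars.isdigit c = true
    · rw [show (c :: rest).foldl pvStep (cur, nums) = rest.foldl pvStep (cur ++ [c], nums) from by
        simp [List.foldl_cons, pvStep, h]]
      rw [ih (cur ++ [c]) nums]
      simp [pvRunsFrom, h]
    · by_cases hc : cur = []
      · rw [show (c :: rest).foldl pvStep (cur, nums) = rest.foldl pvStep ([], nums) from by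
          simp [List.foldl_cons, pvStep, h, hc]]
        rw [ih [] nums]
        simp [pvRunsFrom, h, hc]
      · rw [show (c :: rest).foldl pvStep (cur, nums) =
            rest.foldl pvStep ([], nums ++ [(PySem.Int.ofChars? cur).getD 0]) from by
          simp [List.foldl_cons, pvStep, h, hc]]
        rw [ih [] (nums ++ [(PySem.Int.ofChars? cur).getD 0])]
        simp [pvRunsFrom, h, hc]

-- ===== VERDICT (by name: the statement is the Claim_ definition above) =====
theorem extractMaximum_spec : Claim_equal_extractMaximum := by
  intro S _ _
  unfold Spec_extractMaximum extractMaximum extractMaximum_alt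
  by_cases ha : PySem.Chars.strIsalpha S.toList = true
  · simp only [ha, if_true]
  · simp only [eq_false_of_ne_true ha, if_false, Bool.false_eq_true]
    rw [show PySem.Chars.len S.toList = ((S.toList.length : Nat) : Int) from by
      simp [PySem.Chars.len_eq]]
    rw [PySem.List.foldl_pyRange_zero_pyGetD' S.toList ' '
        (fun res c => if PySem.Chars.isdigit c then res ++ [c] else res ++ [' ']) []]
    rw [pv_mask_foldl S.toList [], List.nil_append, pv_split_mask S.toList]
    rw [pv_scan_eq S.toList [] [], List.nil_append]
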